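-- pv_equiv track=rewrite | github.com/MFK37/Keyword_Columnar_Cipher | main.py | getKeyOrder
-- ===== SOURCE A (Python) =====
-- def getKeyOrder(keyWord):
--     keyWord = keyWord.upper()
--     orderedKey = sorted(keyWord)  # sort the keyword
--     couples = {}  # empty dictionary to add pairs of index and the associated letter
--
--     for i in keyWord:  # go through each letter in the keyword
--         index = orderedKey.index(i)  # get the index of the letter according to the ordered keyword
--         couples[index] = orderedKey[index]  # adding the letter to its index according
--         orderedKey[index] = "-1"  # changing the letter in the ordered keyword to -1 which mean used
--
--     orderedLetterInedex = []  # list to add the order of reading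
--     indexes = list(couples.keys())  # the indexes of the ordered letters
--     for e in range(len(indexes)):  # to go through the number of indexes
--         orderedLetterInedex.append(indexes.index(e))  # adding the index to its correct position
--
--     return orderedLetterInedex
-- ===== SOURCE B (Python) =====
-- def getKeyOrder(keyWord):
--     kw = keyWord.upper()
--     return sorted(range(len(kw)), key=lambda i: (kw[i], i))
-- ===== Notes on version B (the rewrite author's own statement) =====
-- stated objective: faster
-- what changed: A builds ranks by repeatedly scanning and mutating a sorted copy with list.index and then inverts them with another quadratic list.index pass; B returns the read order directly as the stable argsort of the positions keyed by (letter, position) with one sort call.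
import Mathlib
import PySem

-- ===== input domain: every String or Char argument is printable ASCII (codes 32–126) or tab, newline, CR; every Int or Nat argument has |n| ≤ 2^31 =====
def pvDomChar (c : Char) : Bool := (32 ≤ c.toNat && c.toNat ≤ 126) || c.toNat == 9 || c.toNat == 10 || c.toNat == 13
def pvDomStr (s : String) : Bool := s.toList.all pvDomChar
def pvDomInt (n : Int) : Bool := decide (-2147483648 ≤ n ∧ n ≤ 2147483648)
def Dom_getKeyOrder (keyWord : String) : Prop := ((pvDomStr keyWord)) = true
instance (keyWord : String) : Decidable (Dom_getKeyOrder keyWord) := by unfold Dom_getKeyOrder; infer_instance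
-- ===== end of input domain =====

-- B replaces A's quadratic mark-and-rescan ranking (repeated list.index over a mutated copy,
-- then a second quadratic inversion pass) by a single stable sort of the positions keyed by
-- (letter, position); objective: faster (O(n log n) vs O(n^2)).

-- ===== PORT A =====
-- Python's `orderedKey` is a list of 1-char strings into which the 2-char marker "-1" is
-- assigned; it is modelled as `List (Option Char)` with `none` as the (never-equal) marker,
-- which is exact since the marker never compares equal to a 1-char string.
def getKeyOrder (keyWord : String) : List Int :=
  let kw := PySem.Str.upper keyWord
  let orderedKey0 : List (Option Char) := (PySem.List.sorted kw.toList (fun c => c)).map some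
  let st := kw.toList.foldl
    (fun (st : List (Option Char) × PySem.Dict Int (Option Char)) i =>
      match PySem.List.index? st.1 (some i) with
      | some index => (st.1.set index none, st.2.insert (index : Int) (st.1.getD index none))
      | none => st)   -- unreachable: Python's .index would raise, but i always occurs unmarked
    (orderedKey0, PySem.Dict.empty)
  let indexes : List Int := st.2.keys
  (PySem.List.pyRange 0 (PySem.List.len indexes) 1).foldl
    (fun acc e =>
      match PySem.List.index? indexes e with
      | some k => acc ++ [(k : Int)]
      | none => acc)   -- unreachable likewise
    []

-- ===== PORT B =====
-- Source B: sorted(range(len(kw)), key=lambda i: (kw[i], i)); kw[i] is always in range, so the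
-- `.getD 'A'` default of the exact `pyGet?` is never used.
def getKeyOrder_alt (keyWord : String) : List Int :=
  let kw := PySem.Str.upper keyWord
  PySem.List.sorted2 (PySem.List.pyRange 0 (PySem.Str.len kw) 1)
    (fun i => (PySem.Str.pyGet? kw i).getD 'A') (fun i => i)

-- ===== PRECONDITION & SPEC =====
def Spec_getKeyOrder (keyWord : String) (out : List Int) : Prop := out = getKeyOrder_alt keyWord
instance (keyWord : String) (out : List Int) : Decidable (Spec_getKeyOrder keyWord out) := by unfold Spec_getKeyOrder; infer_instance

-- ===== CLAIM (what is proved, stated in full; the proofs are below) =====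
def Claim_equal_getKeyOrder : Prop := ∀ (keyWord : String), Dom_getKeyOrder keyWord → Spec_getKeyOrder keyWord (getKeyOrder keyWord)

-- ===== LEMMAS AND PROOFS =====

-- abbreviations used only by the proofs
def srt (l : List Char) : List Char := PySem.List.sorted l (fun c => c)
def startN (l : List Char) (c : Char) : Nat := ((srt l).filter (fun x => decide (x < c))).length
def cntN (l : List Char) (c : Char) : Nat := ((srt l).filter (fun x => decide (x = c))).length
def usedN (l : List Char) (p : Nat) (c : Char) : Nat := ((l.take p).filter (fun x => decide (x = c))).length
def rkN (l : List Char) (p : Nat) : Nat := startN l (l.getD p 'A') + usedN l p (l.getD p 'A')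
def okAt (l : List Char) (p : Nat) : List (Option Char) :=
  (srt l).mapIdx (fun j c => if j < startN l c + usedN l p c then none else some c)
def ranksI (l : List Char) (p : Nat) : List Int := (List.range p).map (fun q => (rkN l q : Int))

theorem length_srt (l : List Char) : (srt l).length = l.length := by
  simp [srt, PySem.List.length_sorted]

-- a sorted list splits into its <c, =c, >c parts in order
theorem pairwise_filter_decomp (s : List Char) (hs : s.Pairwise (· ≤ ·)) (c : Char) :
    s = s.filter (fun x => decide (x < c)) ++ s.filter (fun x => decide (x = c))
      ++ s.filter (fun x => decide (c < x)) := by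
  induction s with
  | nil => simp
  | cons a t ih =>
    rw [List.pairwise_cons] at hs
    obtain ⟨h1, h2⟩ := hs
    have iht := ih h2
    rcases lt_trichotomy a c with h | h | h
    · simp only [List.filter_cons, h, decide_true, ↓reduceIte, ne_of_lt h, decide_false,
        not_lt.mpr (le_of_lt h), Bool.false_eq_true, List.cons_append]
      exact congrArg (a :: ·) iht
    · subst h
    -- every element of t is ≥ a, so t has no element < a
      have hf : t.filter (fun x => decide (x < a)) = [] :=
        List.filter_eq_nil_iff.mpr (fun b hb => by simpa using not_lt.mpr (h1 b hb))
      simp only [List.filter_cons, lt_irrefl, decide_false, Bool.false_eq_true, ↓reduceIte,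
        decide_true, hf]
      rw [hf] at iht
      simpa using congrArg (a :: ·) iht
    · have hf1 : t.filter (fun x => decide (x < c)) = [] :=
        List.filter_eq_nil_iff.mpr (fun b hb => by simpa using not_lt.mpr (le_of_lt (lt_of_lt_of_le h (h1 b hb))))
      have hf2 : t.filter (fun x => decide (x = c)) = [] :=
        List.filter_eq_nil_iff.mpr (fun b hb => by simpa using (ne_of_gt (lt_of_lt_of_le h (h1 b hb))))
      simp only [List.filter_cons, not_lt.mpr (le_of_lt h), decide_false, ne_of_gt h, hf1, hf2,
        h, decide_true]
      rw [hf1, hf2] at iht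
      simpa using congrArg (a :: ·) iht

theorem srt_pairwise (l : List Char) : (srt l).Pairwise (· ≤ ·) :=
  PySem.List.sorted_pairwise l (fun c => c)

theorem getElem_srt_lt (l : List Char) (c : Char) (j : Nat) (hj : j < (srt l).length)
    (h : j < startN l c) : (srt l)[j] < c := by
  have hd := pairwise_filter_decomp (srt l) (srt_pairwise l) c
  have hA : j < ((srt l).filter (fun x => decide (x < c))).length := h
  have := List.getElem_of_eq hd hj
  rw [List.getElem_append_left (by simpa using Nat.lt_of_lt_of_le hA (by simp)),
    List.getElem_append_left hA] at this
  have hm := List.getElem_mem hA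
  rw [← this] at hm
  simpa using (List.mem_filter.mp hm).2

theorem getElem_srt_eq (l : List Char) (c : Char) (j : Nat) (hj : j < (srt l).length)
    (h1 : startN l c ≤ j) (h2 : j < startN l c + cntN l c) : (srt l)[j] = c := by
  have hd := pairwise_filter_decomp (srt l) (srt_pairwise l) c
  have hAB : j < (((srt l).filter (fun x => decide (x < c))) ++ ((srt l).filter (fun x => decide (x = c)))).length := by
    simpa using h2
  have := List.getElem_of_eq hd hj
  rw [List.getElem_append_left hAB, List.getElem_append_right h1] at this
  have hm := List.getElem_mem (l := (srt l).filter (fun x => decide (x = c)))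
    (n := j - ((srt l).filter (fun x => decide (x < c))).length)
    (by simp only [startN, cntN] at h1 h2; simp only [List.length_append] at hAB; omega)
  rw [← this] at hm
  simpa using (List.mem_filter.mp hm).2

theorem getElem_srt_gt (l : List Char) (c : Char) (j : Nat) (hj : j < (srt l).length)
    (h : startN l c + cntN l c ≤ j) : c < (srt l)[j] := by
  have hd := pairwise_filter_decomp (srt l) (srt_pairwise l) c
  have hlen : ((srt l).filter (fun x => decide (x < c)) ++ (srt l).filter (fun x => decide (x = c))).length ≤ j := by
    simpa using h
  have := List.getElem_of_eq hd hj
  rw [List.getElem_append_right hlen] at this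
  have hm := List.getElem_mem (l := (srt l).filter (fun x => decide (c < x)))
    (n := j - ((srt l).filter (fun x => decide (x < c)) ++ (srt l).filter (fun x => decide (x = c))).length)
    (by
      have hj2 := hj
      conv_rhs at hj2 => rw [hd]
      simp only [startN, cntN] at h
      simp only [List.length_append] at hj2 ⊢
      omega)
  rw [← this] at hm
  simpa using (List.mem_filter.mp hm).2

theorem start_le_getElem (l : List Char) (j : Nat) (hj : j < (srt l).length) :
    startN l ((srt l)[j]) ≤ j := by
  by_contra hcon
  exact lt_irrefl _ (getElem_srt_lt l ((srt l)[j]) j hj (not_le.mp hcon))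

theorem block_lt_block (l : List Char) {c c' : Char} (h : c < c') :
    startN l c + cntN l c ≤ startN l c' := by
  have hd := pairwise_filter_decomp (srt l) (srt_pairwise l) c
  have hA : ((srt l).filter (fun x => decide (x < c))).filter (fun x => decide (x < c'))
      = (srt l).filter (fun x => decide (x < c)) :=
    List.filter_eq_self.mpr (fun x hx => by
      have := (List.mem_filter.mp hx).2
      simp only [decide_eq_true_eq] at this ⊢
      exact lt_trans this h)
  have hB : ((srt l).filter (fun x => decide (x = c))).filter (fun x => decide (x < c'))
      = (srt l).filter (fun x => decide (x = c)) :=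
    List.filter_eq_self.mpr (fun x hx => by
      have := (List.mem_filter.mp hx).2
      simp only [decide_eq_true_eq] at this ⊢
      exact this ▸ h)
  unfold startN cntN
  conv_rhs => rw [hd]
  rw [List.filter_append, List.filter_append, hA, hB]
  simp only [List.length_append]
  omega

theorem start_add_cnt_le (l : List Char) (c : Char) : startN l c + cntN l c ≤ l.length := by
  have hd := congrArg List.length (pairwise_filter_decomp (srt l) (srt_pairwise l) c)
  rw [length_srt] at hd
  simp only [List.length_append] at hd
  unfold startN cntN
  omega

theorem usedN_mono (l : List Char) (c : Char) {p q : Nat} (h : p ≤ q) :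
    usedN l p c ≤ usedN l q c := by
  unfold usedN
  have : l.take p = (l.take q).take p := by rw [List.take_take, Nat.min_eq_left h]
  rw [this]
  exact ((List.take_prefix p (l.take q)).filter _).length_le

theorem usedN_succ (l : List Char) (p : Nat) (hp : p < l.length) (c : Char) :
    usedN l (p + 1) c = usedN l p c + (if l[p] = c then 1 else 0) := by
  unfold usedN
  rw [List.take_add_one, List.getElem?_eq_getElem hp]
  simp only [Option.toList_some, List.filter_append, List.length_append]
  by_cases h : l[p] = c
  · simp [h, List.filter]
  · simp [h, List.filter]

theorem usedN_length (l : List Char) (c : Char) : usedN l l.length c = cntN l c := by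
  unfold usedN cntN
  rw [List.take_length]
  exact (((PySem.List.sorted_perm l (fun c => c) false).filter _).length_eq).symm

theorem usedN_lt_cnt (l : List Char) (p : Nat) (hp : p < l.length) :
    usedN l p l[p] < cntN l l[p] := by
  have h1 := usedN_succ l p hp l[p]
  rw [if_pos rfl] at h1
  have h2 := usedN_mono l l[p] (Nat.succ_le_of_lt hp)
  rw [usedN_length] at h2
  simp only [Nat.succ_eq_add_one] at h2
  omega

theorem rkN_lt (l : List Char) (p : Nat) (hp : p < l.length) : rkN l p < l.length := by
  unfold rkN
  rw [List.getD_eq_getElem l 'A' hp]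
  have := usedN_lt_cnt l p hp
  have := start_add_cnt_le l l[p]
  omega

theorem srt_getElem_rkN (l : List Char) (p : Nat) (hp : p < l.length)
    (h : rkN l p < (srt l).length) : (srt l)[rkN l p] = l[p] := by
  have hrk : rkN l p = startN l l[p] + usedN l p l[p] := by
    unfold rkN; rw [List.getD_eq_getElem l 'A' hp]
  exact getElem_srt_eq l l[p] (rkN l p) h (by omega)
    (by have := usedN_lt_cnt l p hp; omega)

-- ranks are strictly compatible with the lexicographic (letter, position) order
theorem rkN_order (l : List Char) (p q : Nat) (hp : p < l.length) (hq : q < l.length)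
    (h : rkN l p < rkN l q) : l[p] < l[q] ∨ (l[p] = l[q] ∧ p < q) := by
  have hrp : rkN l p = startN l l[p] + usedN l p l[p] := by
    unfold rkN; rw [List.getD_eq_getElem l 'A' hp]
  have hrq : rkN l q = startN l l[q] + usedN l q l[q] := by
    unfold rkN; rw [List.getD_eq_getElem l 'A' hq]
  rcases lt_trichotomy l[p] l[q] with hc | hc | hc
  · exact Or.inl hc
  · refine Or.inr ⟨hc, ?_⟩
    rw [hrp, hrq, hc] at h
    have hused : usedN l p l[q] < usedN l q l[q] := by omega
    by_contra hpq
    exact absurd (usedN_mono l l[q] (Nat.le_of_not_lt hpq)) (Nat.not_le_of_lt hused)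
  · exfalso
    have h1 : rkN l q < startN l l[q] + cntN l l[q] := by
      have := usedN_lt_cnt l q hq; omega
    have h2 := block_lt_block l hc
    omega


theorem rkN_ne (l : List Char) (p q : Nat) (hp : p < l.length) (hq : q < l.length)
    (hpq : p < q) : rkN l p ≠ rkN l q := by
  have hrp : rkN l p = startN l l[p] + usedN l p l[p] := by
    unfold rkN; rw [List.getD_eq_getElem l 'A' hp]
  have hrq : rkN l q = startN l l[q] + usedN l q l[q] := by
    unfold rkN; rw [List.getD_eq_getElem l 'A' hq]
  rcases lt_trichotomy l[p] l[q] with hc | hc | hc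
  · have h1 := usedN_lt_cnt l p hp
    have h2 := block_lt_block l hc
    have h3 : startN l l[q] ≤ rkN l q := by omega
    omega
  · have h1 := usedN_succ l p hp l[p]
    rw [if_pos rfl] at h1
    have h2 := usedN_mono l l[p] (Nat.succ_le_of_lt hpq)
    simp only [Nat.succ_eq_add_one] at h2
    rw [hc] at hrp h1 h2
    omega
  · have h1 := usedN_lt_cnt l q hq
    have h2 := block_lt_block l hc
    omega

theorem okAt_length (l : List Char) (p : Nat) : (okAt l p).length = (srt l).length := by
  simp [okAt]

theorem getElem_okAt (l : List Char) (p : Nat) (j : Nat) (hj : j < (okAt l p).length) :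
    (okAt l p)[j] = if j < startN l ((srt l)[j]'(by
        rw [okAt_length] at hj; exact hj)) + usedN l p ((srt l)[j]'(by
        rw [okAt_length] at hj; exact hj)) then none
      else some ((srt l)[j]'(by rw [okAt_length] at hj; exact hj)) := by
  simp [okAt, List.getElem_mapIdx]

theorem okAt_zero (l : List Char) : okAt l 0 = (srt l).map some := by
  apply List.ext_getElem
  · simp [okAt_length]
  · intro j h1 h2
    have hj : j < (srt l).length := by rw [okAt_length] at h1; exact h1
    rw [getElem_okAt l 0 j h1]
    have : usedN l 0 ((srt l)[j]) = 0 := by simp [usedN]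
    rw [this]
    rw [if_neg (by have := start_le_getElem l j hj; omega)]
    simp

theorem index?_first {α : Type} [BEq α] [LawfulBEq α] (xs : List α) (v : α) (k : Nat)
    (hk : k < xs.length) (hv : xs[k] = v) (hb : ∀ j (_ : j < k), xs[j] ≠ v) :
    PySem.List.index? xs v = some k := by
  apply (PySem.List.index?_eq_some_iff xs v k).mpr
  refine ⟨xs.take k, xs.drop (k + 1), ?_, ?_, ?_⟩
  · conv_lhs => rw [← List.take_append_drop k xs]
    rw [List.drop_eq_getElem_cons hk, hv]
  · simp [List.length_take]; omega
  · intro hm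
    obtain ⟨j, hjl, hje⟩ := List.mem_iff_getElem.mp hm
    have hjk : j < k := by
      have := hjl; rw [List.length_take] at this; omega
    rw [List.getElem_take] at hje
    exact hb j hjk hje

theorem index?_okAt (l : List Char) (p : Nat) (hp : p < l.length) :
    PySem.List.index? (okAt l p) (some (l[p])) = some (rkN l p) := by
  have hn : (okAt l p).length = l.length := by rw [okAt_length, length_srt]
  have hrk : rkN l p = startN l l[p] + usedN l p l[p] := by
    unfold rkN; rw [List.getD_eq_getElem l 'A' hp]
  have hrlt : rkN l p < l.length := rkN_lt l p hp
  have hsr : (srt l)[rkN l p]'(by rw [length_srt]; exact hrlt) = l[p] :=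
    srt_getElem_rkN l p hp (by rw [length_srt]; exact hrlt)
  apply index?_first
  · rw [getElem_okAt l p (rkN l p) (by omega)]
    rw [if_neg (by rw [hsr]; omega)]
    rw [hsr]
  · intro j hj hje
    have hjl : j < (okAt l p).length := by omega
    have hjs : j < (srt l).length := by rw [okAt_length] at hjl; exact hjl
    rw [getElem_okAt l p j hjl] at hje
    by_cases hmk : j < startN l ((srt l)[j]) + usedN l p ((srt l)[j])
    · rw [if_pos hmk] at hje; simp at hje
    · rw [if_neg hmk] at hje
      have hce : (srt l)[j] = l[p] := Option.some.inj hje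
      rw [hce] at hmk
      have := start_le_getElem l j hjs
      rw [hce] at this
      omega

theorem okAt_set (l : List Char) (p : Nat) (hp : p < l.length) :
    (okAt l p).set (rkN l p) none = okAt l (p + 1) := by
  have hrk : rkN l p = startN l l[p] + usedN l p l[p] := by
    unfold rkN; rw [List.getD_eq_getElem l 'A' hp]
  have hrlt : rkN l p < (srt l).length := by rw [length_srt]; exact rkN_lt l p hp
  have hsr : (srt l)[rkN l p] = l[p] := srt_getElem_rkN l p hp hrlt
  apply List.ext_getElem
  · simp [okAt_length]
  · intro j h1 h2
    have hjs : j < (srt l).length := by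
      simp only [List.length_set, okAt_length] at h1; exact h1
    rw [List.getElem_set, getElem_okAt l (p+1) j h2, getElem_okAt l p j (by
      rw [okAt_length]; exact hjs)]
    have hu := usedN_succ l p hp ((srt l)[j])
    by_cases hjr : rkN l p = j
    · rw [if_pos hjr]
      subst hjr
      rw [hsr] at hu ⊢
      rw [if_pos (by rw [if_pos rfl] at hu; omega)]
    · rw [if_neg hjr]
      by_cases hcc : l[p] = (srt l)[j]
      · rw [if_pos hcc] at hu
        have hst : startN l ((srt l)[j]) ≤ j := start_le_getElem l j hjs
        have hblock : j < startN l ((srt l)[j]) + cntN l ((srt l)[j]) := by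
          by_contra hcon
          exact lt_irrefl _ (getElem_srt_gt l ((srt l)[j]) j hjs (Nat.le_of_not_lt hcon))
        rw [hu]
        by_cases hm : j < startN l ((srt l)[j]) + usedN l p ((srt l)[j])
        · rw [if_pos hm, if_pos (by omega)]
        · rw [if_neg hm, if_neg (by
            rw [← hcc] at hm ⊢
            omega)]
      · rw [if_neg hcc] at hu
        rw [hu]
        simp

theorem ranksI_succ (l : List Char) (p : Nat) :
    ranksI l (p + 1) = ranksI l p ++ [((rkN l p : Int))] := by
  simp [ranksI, List.range_succ]

theorem not_mem_ranksI (l : List Char) (p : Nat) (hp : p < l.length) :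
    ((rkN l p : Int)) ∉ ranksI l p := by
  intro hm
  obtain ⟨q, hq, hqe⟩ := List.mem_map.mp hm
  have hqp : q < p := List.mem_range.mp hq
  exact rkN_ne l q p (lt_trans hqp hp) hp hqp (Int.natCast_inj.mp hqe)

theorem loop1_invariant (l : List Char) (p : Nat) (hp : p ≤ l.length) :
    ∃ d : PySem.Dict Int (Option Char),
      (l.take p).foldl
        (fun (st : List (Option Char) × PySem.Dict Int (Option Char)) i =>
          match PySem.List.index? st.1 (some i) with
          | some index => (st.1.set index none, st.2.insert (index : Int) (st.1.getD index none))
          | none => st)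
        ((srt l).map some, PySem.Dict.empty) = (okAt l p, d) ∧ d.keys = ranksI l p := by
  induction p with
  | zero =>
    refine ⟨PySem.Dict.empty, ?_, ?_⟩
    · simp [okAt_zero]
    · simp [ranksI, PySem.Dict.keys, PySem.Dict.empty]
  | succ p ih =>
    have hplt : p < l.length := Nat.lt_of_lt_of_le (Nat.lt_succ_self p) hp
    obtain ⟨d, hfold, hkeys⟩ := ih (Nat.le_of_lt hplt)
    rw [List.take_add_one, List.getElem?_eq_getElem hplt]
    simp only [Option.toList_some, List.foldl_append, hfold, List.foldl_cons, List.foldl_nil]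
    rw [index?_okAt l p hplt]
    refine ⟨d.insert ((rkN l p : Int)) ((okAt l p).getD (rkN l p) none), ?_, ?_⟩
    · simp [okAt_set l p hplt]
    · rw [PySem.Dict.keys_insert_of_not_contains d _ (by
        rw [PySem.Dict.contains_eq_decide_mem_keys, hkeys]
        exact decide_eq_false (not_mem_ranksI l p hplt))]
      rw [hkeys, ranksI_succ]

theorem pyRange_natCast (n : Nat) :
    PySem.List.pyRange 0 (n : Int) 1 = (List.range n).map (fun k : Nat => (k : Int)) := by
  apply List.ext_getElem?
  intro k
  rw [PySem.List.getElem?_pyRange_one]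
  rw [List.getElem?_map]
  by_cases h : k < n
  · rw [if_pos (by omega), List.getElem?_eq_getElem (by simpa using h)]
    simp [List.getElem_range]
  · rw [if_neg (by omega), List.getElem?_eq_none (by simpa using Nat.le_of_not_lt h)]
    rfl

theorem perm_of_nodup_subset_length {α : Type} [DecidableEq α] (xs ys : List α)
    (hnd : xs.Nodup) (hsub : xs ⊆ ys) (hlen : ys.length ≤ xs.length) : xs.Perm ys :=
  (hnd.subperm hsub).perm_of_length_le hlen

theorem ranksI_perm (l : List Char) :
    (ranksI l l.length).Perm (PySem.List.pyRange 0 (l.length : Int) 1) := by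
  rw [pyRange_natCast]
  apply perm_of_nodup_subset_length
  · apply List.Nodup.map_on ?_ List.nodup_range
    intro x hx y hy hxy
    have hxn : x < l.length := List.mem_range.mp hx
    have hyn : y < l.length := List.mem_range.mp hy
    by_contra hne
    rcases Nat.lt_or_gt_of_ne hne with h | h
    · exact rkN_ne l x y hxn hyn h (Int.natCast_inj.mp hxy)
    · exact rkN_ne l y x hyn hxn h (Int.natCast_inj.mp hxy.symm)
  · intro x hx
    obtain ⟨q, hq, rfl⟩ := List.mem_map.mp hx
    have hqn : q < l.length := List.mem_range.mp hq
    simp only [List.mem_map]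
    exact ⟨rkN l q, List.mem_range.mpr (rkN_lt l q hqn), rfl⟩
  · simp [ranksI]

def outL (l : List Char) : List Int :=
  (List.range l.length).map (fun e : Nat => (List.idxOf ((e : Int)) (ranksI l l.length) : Int))

theorem idxOf?_of_mem {α : Type} [BEq α] [LawfulBEq α] (K : List α) (e : α) (h : e ∈ K) :
    List.idxOf? e K = some (List.idxOf e K) := by
  induction K with
  | nil => cases h
  | cons a t ih =>
    by_cases hae : a = e
    · subst hae
      simp [List.idxOf?_cons]
    · have het : e ∈ t := by
        cases List.mem_cons.mp h with
        | inl h' => exact absurd h'.symm hae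
        | inr h' => exact h'
      simp [List.idxOf?_cons, hae, ih het, List.idxOf_cons_ne _ (Ne.symm hae)]

theorem foldl_index_append (K : List Int) (es : List Int) (acc : List Int)
    (h : ∀ e ∈ es, e ∈ K) :
    es.foldl (fun acc e =>
      match PySem.List.index? K e with
      | some k => acc ++ [(k : Int)]
      | none => acc) acc = acc ++ es.map (fun e => (List.idxOf e K : Int)) := by
  induction es generalizing acc with
  | nil => simp
  | cons e es ih =>
    rw [List.foldl_cons]
    rw [PySem.List.index?_eq_idxOf?, idxOf?_of_mem K e (h e List.mem_cons_self)]
    rw [ih _ (fun e' he' => h e' (List.mem_cons_of_mem e he'))]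
    simp

theorem loop2_eq (l : List Char) :
    (PySem.List.pyRange 0 (PySem.List.len (ranksI l l.length)) 1).foldl
      (fun acc e =>
        match PySem.List.index? (ranksI l l.length) e with
        | some k => acc ++ [(k : Int)]
        | none => acc)
      [] = outL l := by
  have hlen : (ranksI l l.length).length = l.length := by simp [ranksI]
  have hmem : ∀ e ∈ PySem.List.pyRange 0 ((l.length : Int)) 1, e ∈ ranksI l l.length := by
    intro e he
    exact ((ranksI_perm l).mem_iff).mpr he
  rw [PySem.List.len, hlen]
  rw [foldl_index_append _ _ _ hmem]
  rw [pyRange_natCast, List.map_map]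
  simp only [outL, List.nil_append]
  rfl

theorem getKeyOrder_eq_outL (keyWord : String) :
    getKeyOrder keyWord = outL (PySem.Str.upper keyWord).toList := by
  obtain ⟨d, hfold, hkeys⟩ :=
    loop1_invariant (PySem.Str.upper keyWord).toList _ (le_refl (PySem.Str.upper keyWord).toList.length)
  rw [List.take_length] at hfold
  simp only [getKeyOrder]
  rw [show PySem.List.sorted (PySem.Str.upper keyWord).toList (fun c => c)
      = srt (PySem.Str.upper keyWord).toList from rfl, hfold, hkeys]
  exact loop2_eq _

theorem sorted2_eq_sorted_lex (xs : List Int) (k1 : Int → Char) (k2 : Int → Int) :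
    PySem.List.sorted2 xs k1 k2 =
      PySem.List.sorted xs (fun x => (toLex (k1 x, k2 x) : Lex (Char × Int))) := by
  show xs.foldl (fun acc x => PySem.List.insertBy
      (fun a b => decide (k1 a < k1 b) || (!decide (k1 b < k1 a) && decide (k2 a < k2 b))) x acc) []
    = xs.foldl (fun acc x => PySem.List.insertBy
      (fun a b => decide ((toLex (k1 a, k2 a) : Lex (Char × Int)) < toLex (k1 b, k2 b))) x acc) []
  have hcmp : (fun (a b : Int) => decide (k1 a < k1 b) || (!decide (k1 b < k1 a) && decide (k2 a < k2 b)))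
      = fun a b => decide ((toLex (k1 a, k2 a) : Lex (Char × Int)) < toLex (k1 b, k2 b)) := by
    funext a b
    rcases lt_trichotomy (k1 a) (k1 b) with h | h | h
    · simp [h, Prod.Lex.lt_iff]
    · simp [h, Prod.Lex.lt_iff]
    · simp [h, not_lt.mpr (le_of_lt h), Prod.Lex.lt_iff, ne_of_gt h]
  rw [hcmp]

theorem alt_core (l : List Char) :
    PySem.List.sorted (PySem.List.pyRange 0 ((l.length : Int)) 1)
      (fun i => (toLex ((PySem.List.pyGet? l i).getD 'A', i) : Lex (Char × Int))) = outL l := by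
  apply PySem.List.sorted_eq_of_perm_of_pairwise_lt
  · -- outL is a permutation of range(n)
    rw [pyRange_natCast]
    unfold outL
    apply perm_of_nodup_subset_length
    · apply List.Nodup.map_on ?_ List.nodup_range
      intro x hx y hy hxy
      have hx' : ((x : Int)) ∈ ranksI l l.length := ((ranksI_perm l).mem_iff).mpr
        (by rw [pyRange_natCast]; exact List.mem_map.mpr ⟨x, hx, rfl⟩)
      have hy' : ((y : Int)) ∈ ranksI l l.length := ((ranksI_perm l).mem_iff).mpr
        (by rw [pyRange_natCast]; exact List.mem_map.mpr ⟨y, hy, rfl⟩)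
      have hxl : List.idxOf ((x : Int)) (ranksI l l.length) < (ranksI l l.length).length :=
        List.idxOf_lt_length_iff.mpr hx'
      have hyl : List.idxOf ((y : Int)) (ranksI l l.length) < (ranksI l l.length).length :=
        List.idxOf_lt_length_iff.mpr hy'
      have hgx := List.getElem_idxOf hxl
      have hgy := List.getElem_idxOf hyl
      have heq : List.idxOf ((x : Int)) (ranksI l l.length) = List.idxOf ((y : Int)) (ranksI l l.length) :=
        Int.natCast_inj.mp hxy
      simp only [heq] at hgx
      rw [hgy] at hgx
      exact Int.natCast_inj.mp hgx.symm
    · intro v hv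
      obtain ⟨e, he, rfl⟩ := List.mem_map.mp hv
      have he' : ((e : Int)) ∈ ranksI l l.length := ((ranksI_perm l).mem_iff).mpr
        (by rw [pyRange_natCast]; exact List.mem_map.mpr ⟨e, he, rfl⟩)
      have hidx : List.idxOf ((e : Int)) (ranksI l l.length) < (ranksI l l.length).length :=
        List.idxOf_lt_length_iff.mpr he'
      refine List.mem_map.mpr ⟨List.idxOf ((e : Int)) (ranksI l l.length), ?_, rfl⟩
      exact List.mem_range.mpr (by simpa [ranksI] using hidx)
    · simp only [List.length_map, List.length_range]
      exact le_refl _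
  · -- strictly increasing in the lexicographic (letter, position) key
    unfold outL
    rw [List.pairwise_map]
    apply List.Pairwise.imp_of_mem ?_ (List.pairwise_lt_range (n := l.length))
    intro e e' he he' hee
    have hmem : ∀ x : Nat, x ∈ List.range l.length → ((x : Int)) ∈ ranksI l l.length := fun x hx =>
      ((ranksI_perm l).mem_iff).mpr
        (by rw [pyRange_natCast]; exact List.mem_map.mpr ⟨x, hx, rfl⟩)
    have hpl : List.idxOf ((e : Int)) (ranksI l l.length) < (ranksI l l.length).length :=
      List.idxOf_lt_length_iff.mpr (hmem e he)
    have hql : List.idxOf ((e' : Int)) (ranksI l l.length) < (ranksI l l.length).length :=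
      List.idxOf_lt_length_iff.mpr (hmem e' he')
    set p := List.idxOf ((e : Int)) (ranksI l l.length) with hp
    set q := List.idxOf ((e' : Int)) (ranksI l l.length) with hq
    have hpn : p < l.length := by simpa [ranksI] using hpl
    have hqn : q < l.length := by simpa [ranksI] using hql
    have hKp : (ranksI l l.length)[p]'hpl = ((e : Int)) := List.getElem_idxOf hpl
    have hKq : (ranksI l l.length)[q]'hql = ((e' : Int)) := List.getElem_idxOf hql
    have hKp' : (ranksI l l.length)[p]'hpl = ((rkN l p : Int)) := by
      simp [ranksI, List.getElem_range]
    have hKq' : (ranksI l l.length)[q]'hql = ((rkN l q : Int)) := by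
      simp [ranksI, List.getElem_range]
    have hrkp : rkN l p = e := Int.natCast_inj.mp (hKp' ▸ hKp)
    have hrkq : rkN l q = e' := Int.natCast_inj.mp (hKq' ▸ hKq)
    have hord := rkN_order l p q hpn hqn (by omega)
    have hk1p : (PySem.List.pyGet? l ((p : Int))).getD 'A' = l[p] := by
      rw [PySem.List.pyGet?_natCast, List.getElem?_eq_getElem hpn]
      rfl
    have hk1q : (PySem.List.pyGet? l ((q : Int))).getD 'A' = l[q] := by
      rw [PySem.List.pyGet?_natCast, List.getElem?_eq_getElem hqn]
      rfl
    rw [Prod.Lex.lt_iff]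
    simp only [ofLex_toLex, hk1p, hk1q]
    rcases hord with hlt | ⟨heq, hlt⟩
    · exact Or.inl hlt
    · exact Or.inr ⟨heq, by exact_mod_cast hlt⟩

theorem getKeyOrder_alt_eq_outL (keyWord : String) :
    getKeyOrder_alt keyWord = outL (PySem.Str.upper keyWord).toList := by
  simp only [getKeyOrder_alt]
  rw [sorted2_eq_sorted_lex]
  rw [show PySem.Str.len (PySem.Str.upper keyWord)
      = (((PySem.Str.upper keyWord).toList.length : Int)) from rfl]
  have hkey : (fun i : Int =>
        (toLex ((PySem.Str.pyGet? (PySem.Str.upper keyWord) i).getD 'A', i) : Lex (Char × Int)))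
      = fun i : Int =>
        toLex ((PySem.List.pyGet? (PySem.Str.upper keyWord).toList i).getD 'A', i) := by
    funext i
    simp
  rw [hkey]
  exact alt_core (PySem.Str.upper keyWord).toList

-- ===== VERDICT (by name: the statement is the Claim_ definition above) =====
theorem getKeyOrder_spec : Claim_equal_getKeyOrder := by
  intro keyWord _
  unfold Spec_getKeyOrder
  rw [getKeyOrder_eq_outL, getKeyOrder_alt_eq_outL]
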